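-- pv_equiv track=rewrite | github.com/2024eli/AI | xWord/xW.py | up
-- ===== SOURCE A (Python) =====
-- def up(pzl, col, row):
--   up = 0
--   if row == 0:
--     return 0
--   for u in range(1, row+1):
--     if (p:=pzl[row-u][col])=='#':break
--     if p in ('.', '-') or p.isalpha(): up+=1
--   return up
-- ===== SOURCE B (Python) =====
-- def up(pzl, col, row):
--     # phase 1: length of the consecutive non-wall run upward from row-1
--     d = 0
--     while d < row and pzl[row - 1 - d][col] != '#':
--         d += 1
--     # phase 2: count qualifying cells over that segment, scanning by row index
--     return sum(1 for r in range(row - d, row)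
--                if (c := pzl[r][col]) in ('.', '-') or c.isalpha())
-- ===== Notes on version B (the rewrite author's own statement) =====
-- stated objective: alternative
-- what changed: A's single fused upward scan (break at wall, count as it goes) is replaced by two separate passes with different shapes: a while loop that only measures the wall-free run length d, then a count over rows row-d..row-1 scanned by ascending row index.
import Mathlib
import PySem

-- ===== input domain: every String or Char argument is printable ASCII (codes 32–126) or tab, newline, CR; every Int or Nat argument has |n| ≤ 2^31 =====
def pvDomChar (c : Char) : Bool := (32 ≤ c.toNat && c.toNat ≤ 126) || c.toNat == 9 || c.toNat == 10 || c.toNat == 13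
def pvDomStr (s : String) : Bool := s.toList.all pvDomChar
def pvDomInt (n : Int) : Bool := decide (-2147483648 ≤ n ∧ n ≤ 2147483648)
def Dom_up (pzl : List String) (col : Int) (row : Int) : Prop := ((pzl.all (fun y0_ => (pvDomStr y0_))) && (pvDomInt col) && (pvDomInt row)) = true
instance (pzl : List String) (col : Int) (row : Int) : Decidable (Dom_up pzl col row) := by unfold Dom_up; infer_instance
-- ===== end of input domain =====

-- B splits A's fused scan into two passes: find the wall-free run length, then count
-- qualifying cells over that segment by ascending row index; objective: alternative decomposition.

-- ===== PORT A =====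
-- the cell pzl[row-u][col]; total via defaults, exact inside Pre_up ('#' default is never read there)
def upCellA (pzl : List String) (col : Int) (row : Int) (u : Int) : Char :=
  (PySem.Str.pyGet? (PySem.List.pyGetD pzl (row - u) "") col).getD '#'

-- A's for-loop over u with early break and running counter
def upLoopA (pzl : List String) (col : Int) (row : Int) : List Int → Int → Int
  | [], acc => acc
  | u :: us, acc =>
    let p := upCellA pzl col row u
    if p = '#' then acc
    else if p = '.' ∨ p = '-' ∨ PySem.Chars.isalpha p then upLoopA pzl col row us (acc + 1)
    else upLoopA pzl col row us acc

def up (pzl : List String) (col : Int) (row : Int) : Int :=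
  if row = 0 then 0
  else upLoopA pzl col row (PySem.List.pyRange 1 (row + 1) 1) 0

-- ===== PORT B =====
-- the cell pzl[r][col]; total via defaults, exact inside Pre_up
def upCellB (pzl : List String) (col : Int) (r : Int) : Char :=
  (PySem.Str.pyGet? (PySem.List.pyGetD pzl r "") col).getD '#'

-- B's while loop: d counts consecutive non-wall cells upward (fuel = row.toNat bounds the iterations)
def upFindB (pzl : List String) (col : Int) (row : Int) : Nat → Int → Int
  | 0, d => d
  | Nat.succ n, d =>
    if d < row ∧ upCellB pzl col (row - 1 - d) ≠ '#' then upFindB pzl col row n (d + 1) else d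

def up_alt (pzl : List String) (col : Int) (row : Int) : Int :=
  let d := upFindB pzl col row row.toNat 0
  ((PySem.List.pyRange (row - d) row 1).countP (fun r =>
      let c := upCellB pzl col r
      c = '.' || c = '-' || PySem.Chars.isalpha c) : Int)

-- ===== PRECONDITION & SPEC =====
-- Pre_up is exactly the set where Python A returns: it excludes only the inputs on which A
-- raises IndexError, i.e. some cell with no wall '#' strictly above it (within the scanned
-- rows) has its row or column index out of range; B raises exactly there too.
def Pre_up (pzl : List String) (col : Int) (row : Int) : Prop :=
  row ≤ 0 ∨ (row ≤ (pzl.length : Int) ∧ ∀ i : Nat, i < min row.toNat pzl.length →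
    (∀ j : Nat, j < min row.toNat pzl.length → i < j →
       (PySem.Str.pyGet? (pzl.getD j "") col).getD '?' ≠ '#') →
    PySem.Raise.InRange (pzl.getD i "").length col)
instance (pzl : List String) (col : Int) (row : Int) : Decidable (Pre_up pzl col row) := by
  unfold Pre_up; infer_instance

def pvWitness_up : List String × Int × Int := (["CAT", "D.G"], 1, 2)

def Spec_up (pzl : List String) (col : Int) (row : Int) (out : Int) : Prop := out = up_alt pzl col row
instance (pzl : List String) (col : Int) (row : Int) (out : Int) : Decidable (Spec_up pzl col row out) := by unfold Spec_up; infer_instance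

-- ===== CLAIM =====
def Claim_equal_up : Prop := ∀ (pzl : List String) (col : Int) (row : Int), Dom_up pzl col row → Pre_up pzl col row → Spec_up pzl col row (up pzl col row)

-- ===== LEMMAS AND PROOFS =====

-- A's loop with accumulator computes acc + count over the prefix before the first wall
theorem upLoopA_eq (pzl : List String) (col : Int) (row : Int) : ∀ (us : List Int) (acc : Int),
    upLoopA pzl col row us acc
      = acc + (((us.map (upCellA pzl col row)).takeWhile (· ≠ '#')).countP
          (fun c => c = '.' || c = '-' || PySem.Chars.isalpha c) : Int)
  | [], acc => by simp [upLoopA]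
  | u :: us, acc => by
    have ih1 := upLoopA_eq pzl col row us (acc + 1)
    have ih0 := upLoopA_eq pzl col row us acc
    simp only [ne_eq, decide_not] at ih1 ih0
    simp only [upLoopA, List.map_cons, List.takeWhile, ne_eq, decide_not]
    by_cases hw : upCellA pzl col row u = '#'
    · simp [hw]
    · simp only [hw, decide_false, Bool.not_false, if_false]
      rw [List.countP_cons]
      by_cases hq : upCellA pzl col row u = '.' ∨ upCellA pzl col row u = '-' ∨
          PySem.Chars.isalpha (upCellA pzl col row u)
      · have hq' : (upCellA pzl col row u = '.' || upCellA pzl col row u = '-' ||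
            PySem.Chars.isalpha (upCellA pzl col row u)) = true := by
          simp only [Bool.or_eq_true, decide_eq_true_eq]; tauto
        simp only [hq, if_true, ih1, hq', if_true]
        push_cast; ring
      · have hq' : (upCellA pzl col row u = '.' || upCellA pzl col row u = '-' ||
            PySem.Chars.isalpha (upCellA pzl col row u)) = false := by
          rw [not_or, not_or] at hq
          simp only [Bool.or_eq_false_iff, decide_eq_false_iff_not]
          exact ⟨⟨hq.1, hq.2.1⟩, by simpa using hq.2.2⟩
        simp only [hq, if_false, ih0, hq', if_false]
        simp

-- B's while loop computes d plus the length of the wall-free prefix of the cells above d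
theorem upFindB_eq (pzl : List String) (col : Int) (row : Int) : ∀ (fuel : Nat) (d : Int),
    row ≤ d + fuel →
    upFindB pzl col row fuel d
      = d + ((((PySem.List.pyRange d row 1).map
            (fun k => upCellB pzl col (row - 1 - k))).takeWhile (· ≠ '#')).length : Int)
  | 0, d => by
    intro h
    rw [PySem.List.pyRange_one_eq_nil (by simpa using h)]
    simp [upFindB]
  | Nat.succ n, d => by
    intro h
    by_cases hd : d < row
    · rw [PySem.List.pyRange_one_cons hd]
      simp only [List.map_cons, List.takeWhile]
      by_cases hw : upCellB pzl col (row - 1 - d) = '#'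
      · simp [upFindB, hw]
      · have ih := upFindB_eq pzl col row n (d + 1) (by push_cast at h ⊢; omega)
        simp only [upFindB, hd, hw, ne_eq, not_false_iff, and_true, if_true, ih,
          decide_true, decide_not, List.length_cons]
        push_cast; ring
    · rw [PySem.List.pyRange_one_eq_nil (by omega)]
      simp [upFindB, hd]

-- reindexing a count over range n by k ↦ n-1-k
theorem countP_range_rev (q q' : Nat → Bool) (n : Nat)
    (hq : ∀ k, k < n → q' k = q (n - 1 - k)) :
    (List.range n).countP q' = (List.range n).countP q := by
  have hrev : (List.range n).reverse = (List.range n).map (fun i => n - 1 - i) := by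
    simp [List.range_eq_range', List.reverse_range']
  calc (List.range n).countP q'
      = (List.range n).countP (fun k => q (n - 1 - k)) := by
        apply List.countP_congr
        intro k hk
        rw [hq k (List.mem_range.mp hk)]
    _ = ((List.range n).map (fun i => n - 1 - i)).countP q := by
        rw [List.countP_map]; rfl
    _ = (List.range n).countP q := by rw [← hrev, List.countP_reverse]

-- counting the qualifying cells of the wall-free prefix by ascending row index
theorem countSeg (cell : Int → Char) (p : Char → Bool) (row : Int) :
    (PySem.List.pyRange (row - (((((PySem.List.pyRange 0 row 1).map
          (fun k => cell (row - 1 - k))).takeWhile (· ≠ '#')).length : Nat) : Int)) row 1).countP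
        (fun r => p (cell r))
      = (((PySem.List.pyRange 0 row 1).map
          (fun k => cell (row - 1 - k))).takeWhile (· ≠ '#')).countP p := by
  have hle : ((((PySem.List.pyRange 0 row 1).map
      (fun k => cell (row - 1 - k))).takeWhile (· ≠ '#')).length) ≤ row.toNat := by
    have h1 := (List.takeWhile_prefix (p := fun x => decide (x ≠ '#'))
        (l := (PySem.List.pyRange 0 row 1).map (fun k => cell (row - 1 - k)))).length_le
    rw [List.length_map, PySem.List.length_pyRange_one] at h1
    omega
  have htk := List.prefix_iff_eq_take.mp (List.takeWhile_prefix (p := fun x => decide (x ≠ '#'))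
      (l := (PySem.List.pyRange 0 row 1).map (fun k => cell (row - 1 - k))))
  obtain ⟨D, hD⟩ : ∃ D, ((((PySem.List.pyRange 0 row 1).map
      (fun k => cell (row - 1 - k))).takeWhile (· ≠ '#')).length) = D := ⟨_, rfl⟩
  rw [hD] at hle htk ⊢
  rw [htk]
  have hr0 : (PySem.List.pyRange 0 row 1).map (fun k => cell (row - 1 - k))
      = (List.range row.toNat).map (fun k : Nat => cell (row - 1 - (k : Int))) := by
    rw [PySem.List.pyRange_one, List.map_map]
    have hn : (row - 0).toNat = row.toNat := by omega
    rw [hn]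
    apply List.map_congr_left
    intro k _
    simp [Function.comp]
  rw [hr0, ← List.map_take, List.take_range, min_eq_left hle]
  have hL : PySem.List.pyRange (row - (D : Int)) row 1
      = (List.range D).map (fun k : Nat => row - (D : Int) + (k : Int)) := by
    rw [PySem.List.pyRange_one]
    have hn : (row - (row - (D : Int))).toNat = D := by omega
    rw [hn]
  rw [hL, List.countP_map, List.countP_map]
  apply countP_range_rev
  intro k hk
  simp only [Function.comp]
  have hc : (((D - 1 - k : Nat)) : Int) = (D : Int) - 1 - (k : Int) := by omega
  have harg : row - (D : Int) + (k : Int) = row - 1 - (((D - 1 - k : Nat)) : Int) := by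
    rw [hc]; ring
  rw [harg]

-- ===== VERDICT (by name: the statement is the Claim_ definition above) =====
theorem up_spec : Claim_equal_up := by
  intro pzl col row _ _
  unfold Spec_up up up_alt
  show (if row = 0 then 0 else upLoopA pzl col row (PySem.List.pyRange 1 (row + 1) 1) 0)
      = (((PySem.List.pyRange (row - upFindB pzl col row row.toNat 0) row 1).countP
          (fun r => upCellB pzl col r = '.' || upCellB pzl col r = '-'
            || PySem.Chars.isalpha (upCellB pzl col r))) : Int)
  by_cases h0 : row ≤ 0
  · have hf : row.toNat = 0 := by omega
    have hd0 : upFindB pzl col row row.toNat 0 = 0 := by rw [hf]; rfl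
    have h01 : PySem.List.pyRange (row - upFindB pzl col row row.toNat 0) row 1 = [] := by
      rw [hd0]
      exact PySem.List.pyRange_one_eq_nil (by omega)
    rw [h01, PySem.List.pyRange_one_eq_nil (show row + 1 ≤ 1 by omega)]
    simp [upLoopA]
  · have hfind := upFindB_eq pzl col row row.toNat 0 (by omega)
    rw [zero_add] at hfind
    rw [hfind]
    have hcs := countSeg (fun r => upCellB pzl col r)
      (fun c => c = '.' || c = '-' || PySem.Chars.isalpha c) row
    simp only [] at hcs
    rw [hcs, if_neg (by omega : ¬ row = 0), upLoopA_eq, zero_add]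
    have hlists : (PySem.List.pyRange 1 (row + 1) 1).map (upCellA pzl col row)
        = (PySem.List.pyRange 0 row 1).map (fun k => upCellB pzl col (row - 1 - k)) := by
      rw [PySem.List.pyRange_one 1 (row + 1), PySem.List.pyRange_one 0 row,
        List.map_map, List.map_map]
      rw [show row + 1 - 1 = row - 0 by ring]
      apply List.map_congr_left
      intro k _
      simp only [Function.comp, upCellA, upCellB]
      ring_nf
    rw [hlists]
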